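-- pv_equiv track=rewrite | github.com/StefanFarcasanu/Artificial-intelligence | Lab1/pb8.py | determina_numere_binar
-- ===== SOURCE A (Python) =====
-- from queue import Queue
--
-- def determina_numere_binar(n):
--     l = []
--
--     queue = Queue()
--
--     queue.put("1")  # adaugam primul numar binar
--
--     for i in range(0, n):
--         nr = queue.get()  # scoatem primul element
--
--         l.append(int(nr))
--
--         # adaugam in queue numarul curent + caracterul "0" pentru ca acesta reprezinta partea stanga a nodului curent
--         queue.put(nr + "0")
--
--         # adaugam in queue numarul curent + caracterul "1" pentru ca acesta reprezinta partea dreapta a nodului curent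
--         queue.put(nr + "1")
--
--     return l
-- ===== SOURCE B (Python) =====
-- def determina_numere_binar(n):
--     # direct formula: the i-th "binary-looking" number is bin(i) without its '0b' prefix
--     return [int(bin(i)[2:]) for i in range(1, n + 1)]
-- ===== Notes on version B (the rewrite author's own statement) =====
-- stated objective: faster
-- what changed: Replaces the thread-safe Queue BFS that concatenates strings level by level with a direct per-index formula int(bin(i)[2:]) in a single comprehension.
import Mathlib
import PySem

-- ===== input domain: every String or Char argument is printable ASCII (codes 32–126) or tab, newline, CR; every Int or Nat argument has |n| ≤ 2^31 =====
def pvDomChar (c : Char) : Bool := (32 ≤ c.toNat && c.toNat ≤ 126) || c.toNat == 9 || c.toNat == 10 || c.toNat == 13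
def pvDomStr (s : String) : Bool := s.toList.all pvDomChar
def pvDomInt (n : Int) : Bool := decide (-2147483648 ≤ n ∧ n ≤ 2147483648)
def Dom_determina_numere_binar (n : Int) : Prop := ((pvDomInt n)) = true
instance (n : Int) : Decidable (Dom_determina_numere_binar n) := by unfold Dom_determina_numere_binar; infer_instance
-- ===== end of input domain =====

-- B replaces A's thread-safe Queue BFS over strings by the direct formula
-- int(bin(i)[2:]) for i = 1..n (measured constant-factor speedup; same asymptotics).


-- ===== PORT A =====
-- one iteration of A's loop body: pop the queue front, append int(nr) to l,
-- push nr+"0" and nr+"1".  (Empty queue is unreachable: each step pops one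
-- element and pushes two; the [] branch is a totality guard only.)
def pvStepA (st : List Int × List String) : List Int × List String :=
  match st with
  | (l, []) => (l, [])
  | (l, nr :: rest) =>
      (l ++ [(PySem.Int.ofStr? nr).getD 0], rest ++ [nr ++ "0", nr ++ "1"])

def determina_numere_binar (n : Int) : List Int :=
  ((PySem.List.pyRange 0 n 1).foldl (fun st _ => pvStepA st) ([], ["1"])).1

-- ===== PORT B =====
def determina_numere_binar_alt (n : Int) : List Int :=
  (PySem.List.pyRange 1 (n + 1) 1).map (fun i =>
    (PySem.Int.ofStr? (PySem.Str.slice (PySem.Int.pyBin i) (some 2) none)).getD 0)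

-- ===== PRECONDITION & SPEC =====
def Spec_determina_numere_binar (n : Int) (out : List Int) : Prop := out = determina_numere_binar_alt n
instance (n : Int) (out : List Int) : Decidable (Spec_determina_numere_binar n out) := by unfold Spec_determina_numere_binar; infer_instance

-- ===== CLAIM (what is proved, stated in full; the proofs are below) =====
def Claim_equal_determina_numere_binar : Prop := ∀ (n : Int), Dom_determina_numere_binar n → Spec_determina_numere_binar n (determina_numere_binar n)

-- ===== LEMMAS AND PROOFS =====

-- the binary-digit string of m, and the value A/B read back from it
def pvStr (m : Nat) : String := String.ofList (Nat.toDigits 2 m)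
def pvVal (m : Nat) : Int := (PySem.Int.ofChars? (Nat.toDigits 2 m)).getD 0

theorem pvToDigits_two_mul (m : Nat) (h : 1 ≤ m) :
    Nat.toDigits 2 (2 * m) = Nat.toDigits 2 m ++ ['0'] := by
  rw [Nat.toDigits_eq_if (by norm_num)]
  have h1 : ¬ (2 * m < 2) := by omega
  simp [h1, Nat.mul_mod_right]
  decide

theorem pvToDigits_two_mul_add_one (m : Nat) (h : 1 ≤ m) :
    Nat.toDigits 2 (2 * m + 1) = Nat.toDigits 2 m ++ ['1'] := by
  rw [Nat.toDigits_eq_if (by norm_num)]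
  have h1 : ¬ (2 * m + 1 < 2) := by omega
  have h2 : (2 * m + 1) / 2 = m := by omega
  have h3 : (2 * m + 1) % 2 = 1 := by omega
  simp [h1, h2, h3]
  decide

theorem pvStr_append_zero (m : Nat) (h : 1 ≤ m) :
    pvStr m ++ "0" = pvStr (2 * m) := by
  have : "0" = String.ofList ['0'] := by decide
  simp [pvStr, this, pvToDigits_two_mul m h]

theorem pvStr_append_one (m : Nat) (h : 1 ≤ m) :
    pvStr m ++ "1" = pvStr (2 * m + 1) := by
  have : "1" = String.ofList ['1'] := by decide
  simp [pvStr, this, pvToDigits_two_mul_add_one m h]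

theorem pvParse_pvStr (m : Nat) :
    (PySem.Int.ofStr? (pvStr m)).getD 0 = pvVal m := by
  simp [pvStr, pvVal, PySem.Int.ofStr?_ofList]

-- a foldl whose body ignores the element is an iterate
theorem pvFoldl_const {α β : Type} (f : α → α) (l : List β) (init : α) :
    l.foldl (fun st _ => f st) init = f^[l.length] init := by
  induction l generalizing init with
  | nil => rfl
  | cons x t ih => simp [List.foldl_cons, ih, Function.iterate_succ_apply]

-- the queue invariant: after k iterations l holds the values of 1..k and the
-- queue holds the binary strings of k+1..2k+1 in order
theorem pvIter (k : Nat) :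
    pvStepA^[k] ([], ["1"]) =
      ((List.range' 1 k).map pvVal, (List.range' (k + 1) (k + 1)).map pvStr) := by
  induction k with
  | zero =>
      have h1 : pvStr 1 = "1" := by decide
      simp [List.range'_succ, h1]
  | succ k ih =>
      rw [Function.iterate_succ_apply', ih]
      rw [show (k + 1 + 1) = (k + 1) + 1 from rfl, List.range'_succ]
      simp only [List.map_cons, pvStepA]
      have e0 : pvStr (k + 1) ++ "0" = pvStr (2 * (k + 1)) :=
        pvStr_append_zero (k + 1) (by omega)
      have e1 : pvStr (k + 1) ++ "1" = pvStr (2 * (k + 1) + 1) :=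
        pvStr_append_one (k + 1) (by omega)
      refine Prod.ext ?_ ?_
      · show List.map pvVal (List.range' 1 k) ++ [(PySem.Int.ofStr? (pvStr (k + 1))).getD 0]
          = List.map pvVal (List.range' 1 (k + 1))
        rw [List.range'_concat, pvParse_pvStr]
        simp [Nat.add_comm]
      · show List.map pvStr (List.range' (k + 1 + 1) k) ++ [pvStr (k + 1) ++ "0", pvStr (k + 1) ++ "1"]
          = List.map pvStr (List.range' (k + 1 + 1) (k + 1 + 1))
        rw [e0, e1, List.range'_concat, List.range'_concat]
        simp
        exact ⟨congrArg pvStr (by omega), congrArg pvStr (by omega)⟩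

-- A computes the values of 1..n
theorem pvA_eq (n : Int) :
    determina_numere_binar n = (List.range n.toNat).map (fun j => pvVal (1 + j)) := by
  unfold determina_numere_binar
  rw [pvFoldl_const, PySem.List.length_pyRange_one]
  simp only [Int.sub_zero]
  rw [pvIter n.toNat, List.range'_eq_map_range]
  simp [List.map_map, Function.comp_def]

-- B's per-index formula computes the same value
theorem pvB_elem (k : Nat) :
    (PySem.Int.ofStr? (PySem.Str.slice (PySem.Int.pyBin (1 + (k : Int))) (some 2) none)).getD 0
      = pvVal (1 + k) := by
  rw [PySem.Int.ofStr?.eq_1, PySem.Str.toList_slice, PySem.Int.toList_pyBin]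
  have hpos : ¬ ((1 + (k : Int)) < 0) := by omega
  have htn : (1 + (k : Int)).toNat = 1 + k := by omega
  simp only [PySem.Int.toBinChars0b]
  rw [if_neg hpos, htn]
  rw [show PySem.Chars.slice ('0' :: 'b' :: Nat.toDigits 2 (1 + k)) (some 2) none =
        PySem.List.slice ('0' :: 'b' :: Nat.toDigits 2 (1 + k)) (some 2) none from rfl]
  rw [PySem.List.slice_from _ (by norm_num : (0:Int) ≤ 2)]
  simp [pvVal]

theorem pvB_eq (n : Int) :
    determina_numere_binar_alt n = (List.range n.toNat).map (fun j => pvVal (1 + j)) := by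
  unfold determina_numere_binar_alt
  rw [PySem.List.pyRange_one]
  have h : (n + 1 - 1).toNat = n.toNat := by omega
  rw [h, List.map_map]
  exact List.map_congr_left (fun k _ => by
    simpa [Function.comp_def] using pvB_elem k)

-- ===== VERDICT (by name: the statement is the Claim_ definition above) =====
theorem determina_numere_binar_spec : Claim_equal_determina_numere_binar := by
  intro n _
  unfold Spec_determina_numere_binar
  rw [pvA_eq, pvB_eq]
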